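-- pv_equiv track=rewrite | github.com/AbhishekD1998/ac-scraper-v1 | app.py | extract_address_snippets
-- ===== SOURCE A (Python) =====
-- def extract_address_snippets(text: str):
--     if not text: return []
--     lines = [ln.strip() for ln in text.splitlines() if ln.strip()]
--     keys = ("address","head office","registered office","location","office","impressum")
--     out = []
--     for i, ln in enumerate(lines):
--         low = ln.lower()
--         if any(k in low for k in keys) and ("," in ln or any(ch.isdigit() for ch in ln)):
--             snippet = ln
--             if i+1 < len(lines) and ("," in lines[i+1] or any(ch.isdigit() for ch in lines[i+1])):
--                 snippet += " " + lines[i+1]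
--             out.append(snippet)
--     clean, seen = [], set()
--     for s in out:
--         s = " ".join(s.split())
--         if s not in seen:
--             seen.add(s)
--             clean.append(s[:300])
--     return clean[:3]
-- ===== SOURCE B (Python) =====
-- def extract_address_snippets(text: str):
--     if not text:
--         return []
--     lines = [ln.strip() for ln in text.splitlines() if ln.strip()]
--     keys = ("address", "head office", "registered office", "location", "office", "impressum")
--
--     def hit(s):
--         return "," in s or any(ch.isdigit() for ch in s)
--
--     res = []
--     seen = set()
--     for i, ln in enumerate(lines):
--         if len(res) == 3:
--             break
--         if any(k in ln.lower() for k in keys) and hit(ln):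
--             snippet = ln
--             if i + 1 < len(lines) and hit(lines[i + 1]):
--                 snippet = ln + " " + lines[i + 1]
--             norm = " ".join(snippet.split())
--             if norm not in seen:
--                 seen.add(norm)
--                 res.append(norm[:300])
--     return res
-- ===== Notes on version B (the rewrite author's own statement) =====
-- stated objective: alternative
-- what changed: A builds the full snippet list in one loop and then runs a second dedup/truncate loop and slices the first 3; B is a single fused pass over the enumerated lines that normalizes, dedups, truncates each hit immediately and breaks as soon as 3 results exist.
import Mathlib
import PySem

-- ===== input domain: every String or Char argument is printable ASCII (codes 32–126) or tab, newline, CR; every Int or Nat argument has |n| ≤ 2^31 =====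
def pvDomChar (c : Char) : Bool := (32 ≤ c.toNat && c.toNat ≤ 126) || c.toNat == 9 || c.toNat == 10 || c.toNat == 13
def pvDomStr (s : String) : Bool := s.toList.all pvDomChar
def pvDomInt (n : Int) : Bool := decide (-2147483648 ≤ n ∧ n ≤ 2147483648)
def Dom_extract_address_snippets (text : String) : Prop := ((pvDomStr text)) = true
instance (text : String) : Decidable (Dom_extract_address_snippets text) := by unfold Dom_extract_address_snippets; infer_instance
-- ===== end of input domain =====

-- B fuses A's two phases (collect all snippets, then dedup/truncate/slice) into one pass over the
-- enumerated lines that normalizes, dedups, truncates and stops as soon as 3 results are found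
-- (objective: alternative single-pass decomposition with early exit).

-- ===== PORT A =====
def extract_address_snippets (text : String) : List String :=
  if text.toList.isEmpty then []
  else
    let lines := ((PySem.Chars.splitlines text.toList).filter
        (fun ln => !(PySem.Chars.strip ln).isEmpty)).map PySem.Chars.strip
    let keys : List (List Char) := ["address".toList, "head office".toList,
        "registered office".toList, "location".toList, "office".toList, "impressum".toList]
    let out := (PySem.List.enumerate lines 0).foldl (fun out iln =>
        let low := PySem.Chars.lower iln.2
        if (keys.any fun k => PySem.Chars.isIn k low) &&
            (PySem.Chars.isIn [','] iln.2 || iln.2.any PySem.Chars.isdigit) then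
          let snippet :=
            if decide (iln.1 + 1 < (lines.length : Int)) &&
                (let nx := (PySem.List.pyGet? lines (iln.1 + 1)).getD []
                 PySem.Chars.isIn [','] nx || nx.any PySem.Chars.isdigit) then
              iln.2 ++ ' ' :: (PySem.List.pyGet? lines (iln.1 + 1)).getD []
            else iln.2
          out ++ [snippet]
        else out) []
    let cs := out.foldl (fun (cs : List (List Char) × PySem.Set (List Char)) s =>
        let s' := PySem.Chars.join [' '] (PySem.Chars.split₀ s)
        if PySem.Set.contains cs.2 s' then cs
        else (cs.1 ++ [PySem.List.slice s' none (some 300)], PySem.Set.add cs.2 s'))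
      ([], PySem.Set.empty)
    (PySem.List.slice cs.1 none (some 3)).map String.ofList

-- ===== PORT B =====
def bHit (s : List Char) : Bool :=
  PySem.Chars.isIn [','] s || s.any PySem.Chars.isdigit

def bKeys : List (List Char) :=
  ["address".toList, "head office".toList, "registered office".toList,
   "location".toList, "office".toList, "impressum".toList]

def bKeyed (s : List Char) : Bool :=
  bKeys.any fun k => PySem.Chars.isIn k (PySem.Chars.lower s)

def bNorm (s : List Char) : List Char :=
  PySem.Chars.join [' '] (PySem.Chars.split₀ s)

def bLoop (lines : List (List Char)) :
    List (Int × List Char) → PySem.Set (List Char) → List (List Char) → List (List Char)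
  | [], _, res => res
  | (i, ln) :: rest, seen, res =>
    if res.length == 3 then res
    else if bKeyed ln && bHit ln then
      let nx := (PySem.List.pyGet? lines (i + 1)).getD []
      let snippet := if decide (i + 1 < (lines.length : Int)) && bHit nx then ln ++ ' ' :: nx else ln
      let norm := bNorm snippet
      if PySem.Set.contains seen norm then bLoop lines rest seen res
      else bLoop lines rest (PySem.Set.add seen norm) (res ++ [PySem.List.slice norm none (some 300)])
    else bLoop lines rest seen res

def extract_address_snippets_alt (text : String) : List String :=
  if text.toList.isEmpty then []
  else
    let lines := ((PySem.Chars.splitlines text.toList).filter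
        (fun ln => !(PySem.Chars.strip ln).isEmpty)).map PySem.Chars.strip
    (bLoop lines (PySem.List.enumerate lines 0) PySem.Set.empty []).map String.ofList

-- ===== PRECONDITION & SPEC =====
def Spec_extract_address_snippets (text : String) (out : List String) : Prop := out = extract_address_snippets_alt text
instance (text : String) (out : List String) : Decidable (Spec_extract_address_snippets text out) := by unfold Spec_extract_address_snippets; infer_instance

-- ===== CLAIM (what is proved, stated in full; the proofs are below) =====
def Claim_equal_extract_address_snippets : Prop := ∀ (text : String), Dom_extract_address_snippets text → Spec_extract_address_snippets text (extract_address_snippets text)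

-- ===== LEMMAS AND PROOFS =====

-- A's snippet for the enumerated line `iln` (exactly the value A's first loop appends).
def aSnip (lines : List (List Char)) (iln : Int × List Char) : List Char :=
  if decide (iln.1 + 1 < (lines.length : Int)) && bHit ((PySem.List.pyGet? lines (iln.1 + 1)).getD []) then
    iln.2 ++ ' ' :: (PySem.List.pyGet? lines (iln.1 + 1)).getD []
  else iln.2

-- One step of A's dedup/truncate fold.
def ddStep (cs : List (List Char) × PySem.Set (List Char)) (s : List Char) :
    List (List Char) × PySem.Set (List Char) :=
  let s' := bNorm s
  if PySem.Set.contains cs.2 s' then cs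
  else (cs.1 ++ [PySem.List.slice s' none (some 300)], PySem.Set.add cs.2 s')

-- A's dedup fold only ever appends to the `clean` component.
theorem dd_prefix (ss : List (List Char)) (clean : List (List Char))
    (seen : PySem.Set (List Char)) :
    ∃ e, (ss.foldl ddStep (clean, seen)).1 = clean ++ e := by
  induction ss generalizing clean seen with
  | nil => exact ⟨[], by simp⟩
  | cons s t ih =>
    simp only [List.foldl_cons, ddStep]
    split
    · exact ih clean seen
    · obtain ⟨e, he⟩ := ih (clean ++ [PySem.List.slice (bNorm s) none (some 300)])
        (PySem.Set.add seen (bNorm s))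
      exact ⟨_, by simpa using he⟩

-- The fused loop equals "dedup the snippet list, then take 3", for any state with ≤ 3 results.
theorem bLoop_eq_dd (lines : List (List Char)) (pairs : List (Int × List Char))
    (seen : PySem.Set (List Char)) (res : List (List Char)) (h : res.length ≤ 3) :
    bLoop lines pairs seen res =
      List.take 3 (((pairs.filter (fun iln => bKeyed iln.2 && bHit iln.2)).map
          (aSnip lines)).foldl ddStep (res, seen)).1 := by
  induction pairs generalizing seen res with
  | nil => simp [bLoop, List.take_of_length_le h]
  | cons iln t ih =>
    obtain ⟨i, ln⟩ := iln
    by_cases h3 : res.length = 3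
    · obtain ⟨e, he⟩ := dd_prefix (((((i, ln) :: t).filter
          (fun iln => bKeyed iln.2 && bHit iln.2)).map (aSnip lines))) res seen
      simp [bLoop, h3, he, List.take_append_of_le_length (by omega : 3 ≤ res.length), List.take_of_length_le h]
    · have hlt : res.length < 3 := by omega
      by_cases hp : (bKeyed ln && bHit ln) = true
      · have hrhs : ((((i, ln) :: t).filter (fun iln => bKeyed iln.2 && bHit iln.2)).map (aSnip lines))
            = aSnip lines (i, ln) :: ((t.filter (fun iln => bKeyed iln.2 && bHit iln.2)).map (aSnip lines)) := by
          simp [hp]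
        rw [hrhs, List.foldl_cons]
        have hlhs : bLoop lines ((i, ln) :: t) seen res
            = if PySem.Set.contains seen (bNorm (aSnip lines (i, ln))) then bLoop lines t seen res
              else bLoop lines t (PySem.Set.add seen (bNorm (aSnip lines (i, ln))))
                (res ++ [PySem.List.slice (bNorm (aSnip lines (i, ln))) none (some 300)]) := by
          simp only [bLoop, aSnip]
          rw [if_neg (by simp [h3]), if_pos hp]
        rw [hlhs]
        simp only [ddStep]
        by_cases hc : PySem.Set.contains seen (bNorm (aSnip lines (i, ln))) = true
        · rw [if_pos hc, if_pos hc, ih seen res h]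
        · rw [if_neg hc, if_neg hc,
            ih (PySem.Set.add seen (bNorm (aSnip lines (i, ln))))
              (res ++ [PySem.List.slice (bNorm (aSnip lines (i, ln))) none (some 300)])
              (by simp; omega)]
      · have hrhs : ((((i, ln) :: t).filter (fun iln => bKeyed iln.2 && bHit iln.2)).map (aSnip lines))
            = ((t.filter (fun iln => bKeyed iln.2 && bHit iln.2)).map (aSnip lines)) := by
          simp [hp]
        rw [hrhs]
        have hlhs : bLoop lines ((i, ln) :: t) seen res = bLoop lines t seen res := by
          simp only [bLoop]
          rw [if_neg (by simp [h3]), if_neg hp]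
        rw [hlhs, ih seen res h]

-- ===== VERDICT (by name: the statement is the Claim_ definition above) =====
theorem extract_address_snippets_spec : Claim_equal_extract_address_snippets := by
  intro text _
  show extract_address_snippets text = extract_address_snippets_alt text
  unfold extract_address_snippets extract_address_snippets_alt
  split
  · rfl
  · simp only []
    set lines := ((PySem.Chars.splitlines text.toList).filter
        (fun ln => !(PySem.Chars.strip ln).isEmpty)).map PySem.Chars.strip with hl
    rw [bLoop_eq_dd lines (PySem.List.enumerate lines 0) PySem.Set.empty [] (by simp)]
    have hout : ((PySem.List.enumerate lines 0).foldl (fun out iln =>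
        let low := PySem.Chars.lower iln.2
        if (bKeys.any fun k => PySem.Chars.isIn k low) &&
            (PySem.Chars.isIn [','] iln.2 || iln.2.any PySem.Chars.isdigit) then
          out ++ [aSnip lines iln]
        else out) ([] : List (List Char))) =
        ((PySem.List.enumerate lines 0).filter
          (fun iln => bKeyed iln.2 && bHit iln.2)).map (aSnip lines) := by
      simpa [bKeyed, bHit] using PySem.List.foldl_append_if
        (fun iln : Int × List Char => bKeyed iln.2 && bHit iln.2) (aSnip lines)
        (PySem.List.enumerate lines 0) []
    rw [PySem.List.slice_to _ (by norm_num)]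
    show ((List.take (3 : Int).toNat _).map String.ofList) = _
    rw [← hout]
    rfl
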